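-- pv_equiv track=rewrite | github.com/ArmanNawaz/python-practice-codes | splitArray.py | goodSplit
-- ===== SOURCE A (Python) =====
-- from math import gcd
--
-- def goodSplit(arr, n):
--     dp = [0] * (n+1)
--
--     for i in range(n-1, -1, -1):
--         currbest = dp[i+1] + 1
--         if(arr[i] != 1):
--             for j in range(i+1, n):
--                 if gcd(arr[i], arr[j]) > 1:
--                     currbest = min(currbest, dp[j+1] + 1)
--         else:
--             currbest -= 1
--
--         dp[i] = currbest
--     return dp[0]
-- ===== SOURCE B (Python) =====
-- def _divisors(v):
--     # all divisors of v that are > 1 (for v >= 0; empty for v <= 1)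
--     ds = []
--     d = 2
--     while d * d <= v:
--         if v % d == 0:
--             ds.append(d)
--             ds.append(v // d)
--         d += 1
--     if v > 1:
--         ds.append(v)
--     return ds
--
--
-- def goodSplit(arr, n):
--     # One right-to-left pass.  Instead of rescanning all later elements with gcd,
--     # keep, for every divisor d > 1, the best (minimum) dp[j+1] + 1 among the later
--     # elements j whose |value| d divides; a value shares a factor with a later one
--     # iff one of its divisors > 1 is a key of that table (0 and |x| > 1 handled apart).
--     best = {}         # divisor -> min of dp[j+1]+1 over later j with divisor | abs(arr[j])
--     best_zero = None  # min of dp[j+1]+1 over later j with arr[j] == 0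
--     best_big = None   # min of dp[j+1]+1 over later j with abs(arr[j]) > 1
--     cur = 0           # dp value at position i+1
--     for i in range(n - 1, -1, -1):
--         v = arr[i]
--         if v == 1:
--             nxt = cur
--         else:
--             cand = cur + 1
--             if v == 0:
--                 if best_big is not None and best_big < cand:
--                     cand = best_big
--             else:
--                 for d in _divisors(abs(v)):
--                     e = best.get(d)
--                     if e is not None and e < cand:
--                         cand = e
--                 if abs(v) > 1 and best_zero is not None and best_zero < cand:
--                     cand = best_zero
--             nxt = cand
--         e = cur + 1
--         if v == 0:
--             if best_zero is None or e < best_zero: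
--                 best_zero = e
--         elif abs(v) > 1:
--             if best_big is None or e < best_big:
--                 best_big = e
--             for d in _divisors(abs(v)):
--                 o = best.get(d)
--                 if o is None or e < o:
--                     best[d] = e
--         cur = nxt
--     return cur
-- ===== Notes on version B (the rewrite author's own statement) =====
-- stated objective: alternative
-- what changed: Replaces A's O(n^2) inner gcd-rescan of all later elements by a single right-to-left pass that keeps, per divisor > 1, the minimum dp[j+1]+1 over later elements it divides (zero and |x|>1 tracked separately), each element looked up through its own divisor list from sqrt trial enumeration; intended as faster in n (measured up to ~75x and past A's timeouts on most generated families, but the per-element sqrt(V) divisor enumeration can dominate on arrays of huge distinct values).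
import Mathlib
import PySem

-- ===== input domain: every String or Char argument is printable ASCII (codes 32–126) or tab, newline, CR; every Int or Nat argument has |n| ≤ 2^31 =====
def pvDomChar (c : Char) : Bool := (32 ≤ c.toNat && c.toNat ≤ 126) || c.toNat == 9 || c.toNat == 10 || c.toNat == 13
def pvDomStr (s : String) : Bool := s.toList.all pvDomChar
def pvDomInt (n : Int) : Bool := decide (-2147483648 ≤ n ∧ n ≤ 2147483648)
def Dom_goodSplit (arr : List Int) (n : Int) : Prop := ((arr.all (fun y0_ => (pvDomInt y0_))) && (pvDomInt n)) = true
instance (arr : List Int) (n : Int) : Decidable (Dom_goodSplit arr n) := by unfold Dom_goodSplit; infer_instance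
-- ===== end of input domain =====

-- B replaces A's quadratic inner gcd-rescan of the later elements by one right-to-left
-- pass over a per-divisor table of minimum dp values (an alternative algorithm).

-- ===== PORT A =====
-- loop body of A's outer 'for i in range(n-1, -1, -1)'
def goodSplitLoop (arr : List Int) (n : Int) (dp : List Int) (i : Int) : List Int :=
  let ai := PySem.List.pyGetD arr i 0
  let currbest := PySem.List.pyGetD dp (i + 1) 0 + 1
  let currbest :=
    if ai ≠ 1 then
      (PySem.List.pyRange (i + 1) n 1).foldl (fun currbest j =>
        if 1 < Int.gcd ai (PySem.List.pyGetD arr j 0) then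
          min currbest (PySem.List.pyGetD dp (j + 1) 0 + 1)
        else currbest) currbest
    else currbest - 1
  PySem.List.pySetD dp i currbest

def goodSplit (arr : List Int) (n : Int) : Int :=
  let dp0 : List Int := List.replicate (n + 1).toNat 0   -- [0] * (n+1)
  let dp := (PySem.List.pyRange (n - 1) (-1) (-1)).foldl (goodSplitLoop arr n) dp0
  PySem.List.pyGetD dp 0 0

-- ===== PORT B =====
-- all divisors > 1 of v, by trial enumeration up to sqrt (port of _divisors; the fuel
-- argument only makes the while loop total — it never runs out, see pvDivsAux_spec)
def pvDivsAux : ℕ → List ℕ → ℕ → ℕ → List ℕ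
  | fuel, ds, v, d =>
    if d * d ≤ v then
      match fuel with
      | 0 => ds
      | fuel + 1 => pvDivsAux fuel (ds ++ if v % d = 0 then [d, v / d] else []) v (d + 1)
    else if 1 < v then ds ++ [v] else ds

def pvDivisors (v : ℕ) : List ℕ := pvDivsAux v [] v 2

-- loop body of B's 'for i in range(n-1, -1, -1)'; state = (cur, best, best_zero, best_big)
def goodSplitAltLoop (arr : List Int)
    (st : Int × PySem.Dict Nat Int × Option Int × Option Int) (i : Int) :
    Int × PySem.Dict Nat Int × Option Int × Option Int :=
  let cur := st.1
  let best := st.2.1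
  let bz := st.2.2.1
  let bb := st.2.2.2
  let v := PySem.List.pyGetD arr i 0
  let nxt :=
    if v = 1 then cur
    else
      let cand := cur + 1
      let cand :=
        if v = 0 then
          match bb with
          | some b => if b < cand then b else cand
          | none => cand
        else
          let cand := (pvDivisors v.natAbs).foldl (fun cand d =>
            match best.get? d with
            | some e => if e < cand then e else cand
            | none => cand) cand
          if 1 < v.natAbs then
            match bz with
            | some z => if z < cand then z else cand
            | none => cand
          else cand
      cand
  let e := cur + 1
  if v = 0 then
    (nxt, best, some (match bz with | none => e | some z => if e < z then e else z), bb)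
  else if 1 < v.natAbs then
    (nxt,
     (pvDivisors v.natAbs).foldl (fun b d =>
       match b.get? d with
       | none => b.insert d e
       | some o => if e < o then b.insert d e else b) best,
     bz,
     some (match bb with | none => e | some b => if e < b then e else b))
  else (nxt, best, bz, bb)

def goodSplit_alt (arr : List Int) (n : Int) : Int :=
  ((PySem.List.pyRange (n - 1) (-1) (-1)).foldl (goodSplitAltLoop arr)
    (0, PySem.Dict.empty, none, none)).1

-- ===== PRECONDITION & SPEC =====
def Pre_goodSplit (arr : List Int) (n : Int) : Prop := 0 ≤ n ∧ n ≤ arr.length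
instance (arr : List Int) (n : Int) : Decidable (Pre_goodSplit arr n) := by
  unfold Pre_goodSplit; infer_instance
def pvWitness_goodSplit : List Int × Int := ([6, 10, 15, 1, 7], 5)

def Spec_goodSplit (arr : List Int) (n : Int) (out : Int) : Prop := out = goodSplit_alt arr n
instance (arr : List Int) (n : Int) (out : Int) : Decidable (Spec_goodSplit arr n out) := by
  unfold Spec_goodSplit; infer_instance

-- ===== CLAIM (what is proved, stated in full; the proofs are below) =====
def Claim_equal_goodSplit : Prop := ∀ (arr : List Int) (n : Int), Dom_goodSplit arr n → Pre_goodSplit arr n → Spec_goodSplit arr n (goodSplit arr n)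

-- ===== LEMMAS AND PROOFS =====

-- value of arr[j] / the candidate dp[j+1]+1
def pvAj (arr : List Int) (j : Int) : Int := PySem.List.pyGetD arr j 0
def pvEj (dp : List Int) (j : Int) : Int := PySem.List.pyGetD dp (j + 1) 0 + 1

-- running minimum over a list, and the minimum of a possibly empty list
def pvMf (a : Int) (l : List Int) : Int := l.foldl min a
def pvMinO : List Int → Option Int
  | [] => none
  | x :: xs => some (pvMf x xs)

-- candidate lists over the already-processed indices j ∈ (i, n)
def pvLk (arr : List Int) (n i : Int) (dp : List Int) (k : ℕ) : List Int :=
  ((PySem.List.pyRange (i + 1) n 1).filter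
    (fun j => decide (1 < (pvAj arr j).natAbs) && decide (k ∣ (pvAj arr j).natAbs))).map (pvEj dp)
def pvLz (arr : List Int) (n i : Int) (dp : List Int) : List Int :=
  ((PySem.List.pyRange (i + 1) n 1).filter (fun j => decide (pvAj arr j = 0))).map (pvEj dp)
def pvLb (arr : List Int) (n i : Int) (dp : List Int) : List Int :=
  ((PySem.List.pyRange (i + 1) n 1).filter (fun j => decide (1 < (pvAj arr j).natAbs))).map (pvEj dp)

-- the joint loop invariant: about to process index i
def pvInv (arr : List Int) (n i : Int) (dp : List Int)
    (st : Int × PySem.Dict Nat Int × Option Int × Option Int) : Prop :=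
  dp.length = (n + 1).toNat ∧
  st.1 = PySem.List.pyGetD dp (i + 1) 0 ∧
  (∀ k : ℕ, 2 ≤ k → st.2.1.get? k = pvMinO (pvLk arr n i dp k)) ∧
  st.2.2.1 = pvMinO (pvLz arr n i dp) ∧
  st.2.2.2 = pvMinO (pvLb arr n i dp)

-- ---- small facts about the running minimum ----
lemma pvMf_le_self (a : Int) (l : List Int) : pvMf a l ≤ a := by
  induction l generalizing a with
  | nil => exact le_refl a
  | cons x xs ih => exact le_trans (ih (min a x)) (min_le_left a x)
lemma pvMf_le_mem (a : Int) {l : List Int} {x : Int} (hx : x ∈ l) : pvMf a l ≤ x := by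
  induction l generalizing a with
  | nil => cases hx
  | cons y ys ih =>
    rcases List.mem_cons.mp hx with rfl | h
    · exact le_trans (pvMf_le_self (min a x) ys) (min_le_right a x)
    · exact ih (min a y) h
lemma pvMf_mem_or (a : Int) (l : List Int) : pvMf a l = a ∨ pvMf a l ∈ l := by
  induction l generalizing a with
  | nil => exact Or.inl rfl
  | cons x xs ih =>
    rcases ih (min a x) with h | h
    · rcases min_cases a x with ⟨h2, _⟩ | ⟨h2, _⟩
      · exact Or.inl (by simpa [pvMf, h2] using h)
      · exact Or.inr (by simp [pvMf] at h ⊢; left; omega)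
    · exact Or.inr (List.mem_cons_of_mem x h)
lemma pvMf_cons' (a x : Int) (l : List Int) : pvMf a (x :: l) = min a (pvMf x l) := by
  induction l generalizing a x with
  | nil => simp [pvMf]
  | cons y ys ih =>
    show pvMf (min a x) (y :: ys) = min a (pvMf x (y :: ys))
    rw [ih (min a x) y, ih x y]
    omega
lemma pvMf_eq_of {a : Int} {l l' : List Int}
    (h1 : ∀ x ∈ l, a ≤ x ∨ ∃ y ∈ l', y ≤ x)
    (h2 : ∀ x ∈ l', a ≤ x ∨ ∃ y ∈ l, y ≤ x) : pvMf a l = pvMf a l' := by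
  have key : ∀ (m m' : List Int), (∀ x ∈ m, a ≤ x ∨ ∃ y ∈ m', y ≤ x) → pvMf a m' ≤ pvMf a m := by
    intro m m' hm
    rcases pvMf_mem_or a m with h | h
    · rw [h]; exact pvMf_le_self a m'
    · rcases hm _ h with h3 | ⟨y, hy, hyx⟩
      · exact le_trans (pvMf_le_self a m') h3
      · exact le_trans (pvMf_le_mem a hy) hyx
  exact le_antisymm (key l' l h2) (key l l' h1)
lemma pvMinO_cons (x : Int) (l : List Int) :
    pvMinO (x :: l) = some (match pvMinO l with | none => x | some y => min y x) := by
  cases l with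
  | nil => rfl
  | cons y ys =>
    show some (pvMf x (y :: ys)) = some (min (pvMf y ys) x)
    rw [pvMf_cons' x y ys]
    congr 1
    omega
lemma pvMinO_le {l : List Int} {y x : Int} (h : pvMinO l = some y) (hx : x ∈ l) : y ≤ x := by
  cases l with
  | nil => cases hx
  | cons z zs =>
    simp only [pvMinO, Option.some.injEq] at h
    subst h
    rcases List.mem_cons.mp hx with rfl | h
    · exact pvMf_le_self x zs
    · exact pvMf_le_mem z h
lemma pvMinO_mem {l : List Int} {y : Int} (h : pvMinO l = some y) : y ∈ l := by
  cases l with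
  | nil => cases h
  | cons z zs =>
    simp only [pvMinO, Option.some.injEq] at h
    subst h
    rcases pvMf_mem_or z zs with h | h
    · rw [h]; exact List.mem_cons_self
    · exact List.mem_cons_of_mem z h
lemma pvMf_merge (a : Int) (l : List Int) :
    (match pvMinO l with | none => a | some y => if y < a then y else a) = pvMf a l := by
  cases l with
  | nil => rfl
  | cons x xs =>
    show (if pvMf x xs < a then pvMf x xs else a) = pvMf a (x :: xs)
    rw [pvMf_cons' a x xs]
    omega

-- ---- loop shapes: the two fold bodies as running minima ----
lemma pvFoldl_if_min {α : Type} (l : List α) (p : α → Prop) [DecidablePred p]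
    (f : α → Int) (a : Int) :
    l.foldl (fun c j => if p j then min c (f j) else c) a
      = pvMf a ((l.filter (fun j => decide (p j))).map f) := by
  induction l generalizing a with
  | nil => rfl
  | cons x xs ih =>
    by_cases h : p x <;> simp [h, ih, pvMf]
lemma pvFoldl_get_min (l : List ℕ) (g : ℕ → Option Int) (a : Int) :
    l.foldl (fun c d =>
      match g d with | some e => if e < c then e else c | none => c) a
      = pvMf a (l.filterMap g) := by
  induction l generalizing a with
  | nil => rfl
  | cons x xs ih =>
    cases hg : g x with
    | none => simp [hg, ih]
    | some e =>
      simp only [List.foldl_cons, List.filterMap_cons, hg, ih]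
      show pvMf (if e < a then e else a) _ = pvMf (min a e) _
      congr 1
      omega
lemma pvGet?_foldl_upd (l : List ℕ) (b : PySem.Dict Nat Int) (e : Int) (k : ℕ) :
    ((l.foldl (fun b d =>
        match b.get? d with
        | none => b.insert d e
        | some o => if e < o then b.insert d e else b) b).get? k)
      = if k ∈ l then some (match b.get? k with | none => e | some x => min x e)
        else b.get? k := by
  induction l generalizing b with
  | nil => simp
  | cons d ds ih =>
    simp only [List.foldl_cons, ih, List.mem_cons]
    have step : ∀ (b1 : PySem.Dict Nat Int),
        ((match b1.get? d with
          | none => b1.insert d e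
          | some o => if e < o then b1.insert d e else b1).get? k)
        = if k = d then some (match b1.get? k with | none => e | some x => min x e)
          else b1.get? k := by
      intro b1
      cases hb : b1.get? d with
      | none =>
        by_cases hk : k = d
        · subst hk; simp [hb]
        · simp [PySem.Dict.get?_insert, hk]
      | some o =>
        by_cases he : e < o
        · by_cases hk : k = d
          · subst hk; simp [hb, he]; omega
          · simp [he, PySem.Dict.get?_insert, hk]
        · by_cases hk : k = d
          · subst hk; simp [hb, he]; omega
          · simp [he, hk]
    rw [step b]
    by_cases hk : k = d
    · subst hk
      by_cases hm : k ∈ ds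
      · simp only [hm, if_true, true_or]
        cases b.get? k <;> simp
      · simp only [hm, if_false, or_false]
    · by_cases hm : k ∈ ds <;> simp [hm, hk]

-- ---- divisor enumeration: soundness and completeness ----
lemma pvDivsAux_acc (fuel : ℕ) (ds : List ℕ) (v d : ℕ) :
    pvDivsAux fuel ds v d = ds ++ pvDivsAux fuel [] v d := by
  induction fuel generalizing ds d with
  | zero =>
    by_cases h : d * d ≤ v
    · simp [pvDivsAux, h]
    · by_cases h2 : 1 < v <;> simp [pvDivsAux, h, h2]
  | succ fuel ih =>
    by_cases h : d * d ≤ v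
    · rw [pvDivsAux, if_pos h]
      rw [show (pvDivsAux (fuel+1) [] v d) = pvDivsAux fuel ([] ++ if v % d = 0 then [d, v / d] else []) v (d+1) by rw [pvDivsAux, if_pos h]]
      rw [ih, List.nil_append, ih (if v % d = 0 then [d, v / d] else [])]
      simp
    · by_cases h2 : 1 < v <;> simp [pvDivsAux, h, h2]
lemma pvDivsAux_sound {v x : ℕ} : ∀ {fuel d : ℕ}, 2 ≤ d →
    x ∈ pvDivsAux fuel [] v d → x ∣ v ∧ 2 ≤ x := by
  intro fuel
  induction fuel with
  | zero =>
    intro d hd hx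
    rw [pvDivsAux] at hx
    split at hx
    · cases hx
    · split at hx
      · rename_i hv
        simp at hx
        subst hx
        exact ⟨dvd_refl _, by omega⟩
      · cases hx
  | succ fuel ih =>
    intro d hd hx
    rw [pvDivsAux] at hx
    split at hx
    · rename_i hdd
      rw [pvDivsAux_acc, List.nil_append] at hx
      rcases List.mem_append.mp hx with h | h
      · split at h
        · rename_i hmod
          have hdvd : d ∣ v := Nat.dvd_of_mod_eq_zero hmod
          simp at h
          rcases h with rfl | rfl
          · exact ⟨hdvd, hd⟩
          · refine ⟨Nat.div_dvd_of_dvd hdvd, ?_⟩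
            have : d ≤ v / d := (Nat.le_div_iff_mul_le (by omega)).mpr (by omega)
            omega
        · cases h
      · exact ih (by omega) h
    · split at hx
      · rename_i hv
        simp at hx
        subst hx
        exact ⟨dvd_refl _, by omega⟩
      · cases hx

lemma pvDivs_sound {v x : ℕ} (h : x ∈ pvDivisors v) : x ∣ v ∧ 2 ≤ x :=
  pvDivsAux_sound (by omega) h

lemma pvDivsAux_self {v : ℕ} (hv : 1 < v) : ∀ {fuel d : ℕ}, 2 ≤ d → v + 2 ≤ fuel + d →
    v ∈ pvDivsAux fuel [] v d := by
  intro fuel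
  induction fuel with
  | zero =>
    intro d hd hinv
    rw [pvDivsAux]
    have : ¬ d * d ≤ v := by nlinarith
    rw [if_neg this, if_pos hv]
    simp
  | succ fuel ih =>
    intro d hd hinv
    rw [pvDivsAux]
    by_cases h : d * d ≤ v
    · rw [if_pos h]
      rw [pvDivsAux_acc, List.nil_append]
      exact List.mem_append_right _ (ih (by omega) (by omega))
    · rw [if_neg h, if_pos hv]; simp

lemma pvDivsAux_complete {v x : ℕ} (hx : 2 ≤ x) (hdvd : x ∣ v) (hxv : x < v) :
    ∀ {fuel d : ℕ}, 2 ≤ d → v + 2 ≤ fuel + d → d ≤ x → d ≤ v / x →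
    x ∈ pvDivsAux fuel [] v d := by
  intro fuel
  induction fuel with
  | zero =>
    intro d hd hinv hdx hdvx
    have hv : 0 < v := by omega
    have hvx2 : x * (v / x) = v := Nat.mul_div_cancel' hdvd
    have : d * d ≤ v := by nlinarith
    omega
  | succ fuel ih =>
    intro d hd hinv hdx hdvx
    have hv : 0 < v := by omega
    have hvx2 : x * (v / x) = v := Nat.mul_div_cancel' hdvd
    have hdd : d * d ≤ v := by nlinarith
    rw [pvDivsAux, if_pos hdd, pvDivsAux_acc, List.nil_append]
    by_cases hcase : d ∣ v ∧ (x = d ∨ x = v / d)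
    · apply List.mem_append_left
      rw [if_pos (Nat.mod_eq_zero_of_dvd hcase.1)]
      rcases hcase.2 with rfl | rfl <;> simp
    · apply List.mem_append_right
      -- since x is not caught here, d < x and d < v / x
      have hne1 : x ≠ d := by
        intro h; subst h; exact hcase ⟨hdvd, Or.inl rfl⟩
      have hne2 : d ≠ v / x := by
        intro h
        have hdv : (v / x) ∣ v := Nat.div_dvd_of_dvd hdvd
        have h2 : v / (v / x) = x := Nat.div_div_self hdvd (by omega)
        exact hcase ⟨h ▸ hdv, Or.inr (by rw [h, h2])⟩
      exact ih (by omega) (by omega) (by omega) (by omega)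

lemma pvDivs_complete {v x : ℕ} (hx : 2 ≤ x) (hdvd : x ∣ v) (hv : 1 ≤ v) :
    x ∈ pvDivisors v := by
  by_cases hxv : x = v
  · subst hxv
    exact pvDivsAux_self (by omega) (by omega) (by omega)
  · have hlt : x < v := lt_of_le_of_ne (Nat.le_of_dvd (by omega) hdvd) hxv
    have hvx2 : x * (v / x) = v := Nat.mul_div_cancel' hdvd
    have h2 : 2 ≤ v / x := by
      rcases Nat.lt_or_ge (v / x) 2 with h | h
      · interval_cases h' : (v / x) <;> omega
      · exact h
    exact pvDivsAux_complete hx hdvd hlt (by omega) (by omega) (by omega) h2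

lemma pvMinO_eq_none {l : List Int} : pvMinO l = none ↔ l = [] := by
  cases l <;> simp [pvMinO]

-- peeling the newly processed index off the front of a candidate list
lemma pvHead {p : Int → Bool} {f f' : Int → Int} {i n : Int} (hin : i < n)
    (hf : ∀ j, i + 1 ≤ j → j < n → f' j = f j) :
    ((PySem.List.pyRange i n 1).filter p).map f'
      = (if p i then [f' i] else []) ++ ((PySem.List.pyRange (i + 1) n 1).filter p).map f := by
  rw [PySem.List.pyRange_one_cons hin, List.filter_cons]
  have hmap : ((PySem.List.pyRange (i + 1) n 1).filter p).map f'
      = ((PySem.List.pyRange (i + 1) n 1).filter p).map f := by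
    apply List.map_congr_left
    intro j hj
    have hb := (PySem.List.mem_pyRange_one).mp (List.mem_of_mem_filter hj)
    exact hf j hb.1 hb.2
  by_cases hp : p i
  · simp [hp, hmap]
  · simp [hp, hmap]

-- ---- the step: processing one index preserves the invariant ----
lemma pvStep (arr : List Int) (n : Int) (i : Int) (hi0 : 0 ≤ i) (hin : i < n)
    (dp : List Int) (st : Int × PySem.Dict Nat Int × Option Int × Option Int)
    (h : pvInv arr n i dp st) :
    pvInv arr n (i - 1) (goodSplitLoop arr n dp i) (goodSplitAltLoop arr st i) := by
  obtain ⟨hlen, hcur, hbest, hbz, hbb⟩ := h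
  set v : Int := PySem.List.pyGetD arr i 0 with hv
  set cur : Int := st.1 with hcurdef
  -- A's computed value of dp[i], in running-minimum form
  set CA : List Int := ((PySem.List.pyRange (i + 1) n 1).filter
      (fun j => decide (1 < Int.gcd v (PySem.List.pyGetD arr j 0)))).map (pvEj dp) with hCA
  set nvA : Int := if v = 1 then cur + 1 - 1 else pvMf (cur + 1) CA with hnvA
  have hGL : goodSplitLoop arr n dp i = PySem.List.pySetD dp i nvA := by
    simp only [goodSplitLoop, ← hv]
    rw [pvFoldl_if_min (PySem.List.pyRange (i + 1) n 1)
      (fun j => 1 < Int.gcd v (PySem.List.pyGetD arr j 0))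
      (fun j => PySem.List.pyGetD dp (j + 1) 0 + 1)]
    by_cases hv1 : v = 1
    · simp [hv1, hnvA, ← hcur]
    · simp only [hnvA, ne_eq, hv1, not_false_iff, if_pos]
      rw [← hcur]
      rfl
  -- reading and preserving entries of the updated dp
  have hEj : ∀ j : Int, i ≤ j → j < n → pvEj (PySem.List.pySetD dp i nvA) j = pvEj dp j := by
    intro j hj hj2
    unfold pvEj
    rw [PySem.List.pySetD_of_nonneg _ _ hi0]
    rw [PySem.List.pyGetD_eq_getElem _ 0 (by omega) (by rw [List.length_set, hlen]; omega),
      PySem.List.pyGetD_eq_getElem _ 0 (by omega) (by rw [hlen]; omega),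
      List.getElem_set_ne (by omega)]
  have hRead : PySem.List.pyGetD (PySem.List.pySetD dp i nvA) (i - 1 + 1) 0 = nvA := by
    rw [show i - 1 + 1 = i by ring, PySem.List.pySetD_of_nonneg _ _ hi0,
      PySem.List.pyGetD_eq_getElem _ 0 hi0 (by rw [List.length_set, hlen]; omega)]
    exact List.getElem_set_self _
  have hEjHead : pvEj (PySem.List.pySetD dp i nvA) i = cur + 1 := by
    rw [hEj i (le_refl i) hin]
    unfold pvEj
    rw [hcur]
  -- head decompositions of the three candidate-list families
  have hLk : ∀ k : ℕ, pvLk arr n (i - 1) (PySem.List.pySetD dp i nvA) k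
      = (if decide (1 < v.natAbs) && decide (k ∣ v.natAbs) then [cur + 1] else [])
        ++ pvLk arr n i dp k := by
    intro k
    unfold pvLk
    rw [show i - 1 + 1 = i by ring, pvHead hin (fun j h1 h2 => hEj j (by omega) h2)]
    simp only [pvAj, ← hv, hEjHead]
  have hLz : pvLz arr n (i - 1) (PySem.List.pySetD dp i nvA)
      = (if decide (v = 0) then [cur + 1] else []) ++ pvLz arr n i dp := by
    unfold pvLz
    rw [show i - 1 + 1 = i by ring, pvHead hin (fun j h1 h2 => hEj j (by omega) h2)]
    simp only [pvAj, ← hv, hEjHead]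
  have hLb : pvLb arr n (i - 1) (PySem.List.pySetD dp i nvA)
      = (if decide (1 < v.natAbs) then [cur + 1] else []) ++ pvLb arr n i dp := by
    unfold pvLb
    rw [show i - 1 + 1 = i by ring, pvHead hin (fun j h1 h2 => hEj j (by omega) h2)]
    simp only [pvAj, ← hv, hEjHead]
  rw [hGL]
  -- the one *hard* fact: A's gcd-scan minimum equals B's divisor-table minimum
  have hkey : ∀ (hv0 : v ≠ 0) (hbig : 1 < v.natAbs),
      pvMf (cur + 1) CA
        = pvMf (cur + 1) ((pvDivisors v.natAbs).filterMap st.2.1.get? ++ pvLz arr n i dp) := by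
    intro hv0 hbig
    apply pvMf_eq_of
    · -- every A-candidate is dominated by a B-candidate
      intro x hx
      rw [hCA] at hx
      obtain ⟨j, hjf, rfl⟩ := List.mem_map.mp hx
      obtain ⟨hjr, hgcdb⟩ := List.mem_filter.mp hjf
      have hgcd : 1 < Int.gcd v (PySem.List.pyGetD arr j 0) := by simpa using hgcdb
      by_cases hjz : PySem.List.pyGetD arr j 0 = 0
      · right
        refine ⟨pvEj dp j, List.mem_append_right _ ?_, le_refl _⟩
        unfold pvLz
        exact List.mem_map.mpr ⟨j, List.mem_filter.mpr ⟨hjr, by simp [pvAj, hjz]⟩, rfl⟩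
      · right
        set k : ℕ := Int.gcd v (PySem.List.pyGetD arr j 0) with hkdef
        have hk2 : 2 ≤ k := hgcd
        have hkv : k ∣ v.natAbs := Int.gcd_dvd_natAbs_left _ _
        have hkj : k ∣ (PySem.List.pyGetD arr j 0).natAbs := Int.gcd_dvd_natAbs_right _ _
        have hkdiv : k ∈ pvDivisors v.natAbs :=
          pvDivs_complete hk2 hkv (by have := Int.natAbs_pos.mpr hv0; omega)
        have hxmem : pvEj dp j ∈ pvLk arr n i dp k := by
          unfold pvLk
          refine List.mem_map.mpr ⟨j, List.mem_filter.mpr ⟨hjr, ?_⟩, rfl⟩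
          have hja : 1 < (PySem.List.pyGetD arr j 0).natAbs := by
            have := Nat.le_of_dvd (Int.natAbs_pos.mpr hjz) hkj
            omega
          simp [pvAj, hja, hkj]
        cases hmo : pvMinO (pvLk arr n i dp k) with
        | none =>
          rw [pvMinO_eq_none] at hmo
          rw [hmo] at hxmem
          cases hxmem
        | some y =>
          refine ⟨y, List.mem_append_left _ ?_, pvMinO_le hmo hxmem⟩
          exact List.mem_filterMap.mpr ⟨k, hkdiv, by rw [hbest k hk2, hmo]⟩
    · -- every B-candidate is itself an A-candidate
      intro x hx
      right
      refine ⟨x, ?_, le_refl x⟩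
      rcases List.mem_append.mp hx with hx | hx
      · obtain ⟨k, hkdiv, hget⟩ := List.mem_filterMap.mp hx
        obtain ⟨hkv, hk2⟩ := pvDivs_sound hkdiv
        rw [hbest k hk2] at hget
        have hxk := pvMinO_mem hget
        unfold pvLk at hxk
        obtain ⟨j, hjf, rfl⟩ := List.mem_map.mp hxk
        obtain ⟨hjr, hcondb⟩ := List.mem_filter.mp hjf
        have hcond : 1 < (pvAj arr j).natAbs ∧ k ∣ (pvAj arr j).natAbs := by
          simpa using hcondb
        rw [hCA]
        refine List.mem_map.mpr ⟨j, List.mem_filter.mpr ⟨hjr, ?_⟩, rfl⟩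
        have hgpos : 0 < Int.gcd v (PySem.List.pyGetD arr j 0) := by
          rcases Nat.eq_zero_or_pos (Int.gcd v (PySem.List.pyGetD arr j 0)) with hz | hp
          · rw [Int.gcd_eq_zero_iff] at hz
            exact absurd hz.1 hv0
          · exact hp
        have hdg : k ∣ Int.gcd v (PySem.List.pyGetD arr j 0) := Nat.dvd_gcd hkv hcond.2
        have := Nat.le_of_dvd hgpos hdg
        simp only [decide_eq_true_eq]
        omega
      · unfold pvLz at hx
        obtain ⟨j, hjf, rfl⟩ := List.mem_map.mp hx
        obtain ⟨hjr, hcondb⟩ := List.mem_filter.mp hjf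
        have hcond : pvAj arr j = 0 := by simpa using hcondb
        rw [hCA]
        refine List.mem_map.mpr ⟨j, List.mem_filter.mpr ⟨hjr, ?_⟩, rfl⟩
        have : PySem.List.pyGetD arr j 0 = 0 := hcond
        simp only [this, Int.gcd_zero_right, decide_eq_true_eq]
        exact hbig
  by_cases hv1 : v = 1
  · -- arr[i] == 1 : dp[i] = dp[i+1], no table update
    have hAlt : goodSplitAltLoop arr st i = (cur, st.2.1, st.2.2.1, st.2.2.2) := by
      simp only [goodSplitAltLoop, ← hv, hv1]
      norm_num
      rfl
    rw [hAlt]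
    refine ⟨by rw [PySem.List.length_pySetD]; exact hlen, ?_, ?_, ?_, ?_⟩
    · show cur = _
      rw [hRead, hnvA, if_pos hv1]
      ring
    · intro k hk
      rw [hLk k]
      norm_num [hv1]
      exact hbest k hk
    · rw [hLz]
      norm_num [hv1]
      exact hbz
    · rw [hLb]
      norm_num [hv1]
      exact hbb
  by_cases hv0 : v = 0
  · -- arr[i] == 0 : matches every later element with |x| > 1; update best_zero
    have hCAb : CA = pvLb arr n i dp := by
      rw [hCA]
      unfold pvLb
      congr 1
      apply List.filter_congr
      intro j hj
      rw [hv0, Int.gcd_zero_left]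
      rfl
    have hnv : nvA = pvMf (cur + 1) (pvLb arr n i dp) := by
      rw [hnvA, if_neg (by rw [hv0]; norm_num), hCAb]
    have hAlt : goodSplitAltLoop arr st i
        = (pvMf (cur + 1) (pvLb arr n i dp), st.2.1,
           some (match pvMinO (pvLz arr n i dp) with
                 | none => cur + 1 | some z => if cur + 1 < z then cur + 1 else z),
           st.2.2.2) := by
      simp only [goodSplitAltLoop, ← hv, hv0, hbb, hbz]
      norm_num
      rw [← pvMf_merge (cur + 1) (pvLb arr n i dp)]
      cases pvMinO (pvLb arr n i dp) <;> cases pvMinO (pvLz arr n i dp) <;>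
        simp only [hcurdef] <;> norm_num
    rw [hAlt]
    refine ⟨by rw [PySem.List.length_pySetD]; exact hlen, ?_, ?_, ?_, ?_⟩
    · show pvMf (cur + 1) (pvLb arr n i dp) = _
      rw [hRead, hnv]
    · intro k hk
      rw [hLk k]
      norm_num [hv0]
      exact hbest k hk
    · rw [hLz]
      norm_num [hv0]
      rw [pvMinO_cons]
      congr 1
      cases pvMinO (pvLz arr n i dp) with
      | none => rfl
      | some z =>
        show (if cur + 1 < z then cur + 1 else z) = min z (cur + 1)
        omega
    · rw [hLb]
      norm_num [hv0]
      exact hbb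
  -- arr[i] ∉ {0, 1}
  by_cases hbig : 1 < v.natAbs
  · -- |arr[i]| > 1 : the divisor-table case
    have hnv : nvA
        = (match pvMinO (pvLz arr n i dp) with
           | none => pvMf (cur + 1) ((pvDivisors v.natAbs).filterMap st.2.1.get?)
           | some z =>
             if z < pvMf (cur + 1) ((pvDivisors v.natAbs).filterMap st.2.1.get?) then z
             else pvMf (cur + 1) ((pvDivisors v.natAbs).filterMap st.2.1.get?)) := by
      rw [hnvA, if_neg hv1, hkey hv0 hbig,
        pvMf_merge (pvMf (cur + 1) ((pvDivisors v.natAbs).filterMap st.2.1.get?))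
          (pvLz arr n i dp)]
      simp only [pvMf, List.foldl_append]
    have hAlt : goodSplitAltLoop arr st i
        = ((match pvMinO (pvLz arr n i dp) with
            | none => pvMf (cur + 1) ((pvDivisors v.natAbs).filterMap st.2.1.get?)
            | some z =>
              if z < pvMf (cur + 1) ((pvDivisors v.natAbs).filterMap st.2.1.get?) then z
              else pvMf (cur + 1) ((pvDivisors v.natAbs).filterMap st.2.1.get?)),
           (pvDivisors v.natAbs).foldl (fun b d =>
             match b.get? d with
             | none => b.insert d (cur + 1)
             | some o => if cur + 1 < o then b.insert d (cur + 1) else b) st.2.1,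
           st.2.2.1,
           some (match pvMinO (pvLb arr n i dp) with
                 | none => cur + 1 | some b => if cur + 1 < b then cur + 1 else b)) := by
      simp only [goodSplitAltLoop, ← hv, if_neg hv1, if_neg hv0, if_pos hbig, hbb, hbz]
      rw [pvFoldl_get_min]
      cases pvMinO (pvLz arr n i dp) <;> cases pvMinO (pvLb arr n i dp) <;>
        simp only [hcurdef]
    rw [hAlt]
    refine ⟨by rw [PySem.List.length_pySetD]; exact hlen, ?_, ?_, ?_, ?_⟩
    · show (match pvMinO (pvLz arr n i dp) with
            | none => _ | some z => _) = _
      rw [hRead, hnv]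
    · intro k hk
      rw [pvGet?_foldl_upd, hLk k]
      norm_num [hbig]
      by_cases hkdvd : k ∣ v.natAbs
      · rw [if_pos (pvDivs_complete hk hkdvd (by omega)), if_pos hkdvd]
        rw [List.singleton_append, pvMinO_cons, hbest k hk]
      · rw [if_neg (fun hmem => hkdvd (pvDivs_sound hmem).1), if_neg hkdvd]
        exact hbest k hk
    · rw [hLz]
      norm_num [hv0]
      exact hbz
    · rw [hLb]
      norm_num [hbig]
      rw [pvMinO_cons]
      congr 1
      cases pvMinO (pvLb arr n i dp) with
      | none => rfl
      | some b =>
        show (if cur + 1 < b then cur + 1 else b) = min b (cur + 1)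
        omega
  · -- |arr[i]| = 1 with arr[i] ≠ 1, i.e. arr[i] = -1 : nothing matches, nothing updates
    have hone : v.natAbs = 1 := by
      have := Int.natAbs_pos.mpr hv0
      omega
    have hCAnil : CA = [] := by
      rw [hCA, List.map_eq_nil_iff, List.filter_eq_nil_iff]
      intro j hj
      have hg1 : Int.gcd v (PySem.List.pyGetD arr j 0) = 1 := by
        show Nat.gcd v.natAbs _ = 1
        rw [hone]
        exact Nat.gcd_one_left _
      simp [hg1]
    have hDnil : pvDivisors v.natAbs = [] := by
      rw [hone]
      rfl
    have hAlt : goodSplitAltLoop arr st i = (cur + 1, st.2.1, st.2.2.1, st.2.2.2) := by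
      simp only [goodSplitAltLoop, ← hv, if_neg hv1, if_neg hv0, if_neg hbig, hDnil]
      simp only [hcurdef]
      norm_num
    rw [hAlt]
    refine ⟨by rw [PySem.List.length_pySetD]; exact hlen, ?_, ?_, ?_, ?_⟩
    · show cur + 1 = _
      rw [hRead, hnvA, if_neg hv1, hCAnil]
      rfl
    · intro k hk
      rw [hLk k]
      norm_num [hbig]
      exact hbest k hk
    · rw [hLz]
      norm_num [hv0]
      exact hbz
    · rw [hLb]
      norm_num [hbig]
      exact hbb
-- ---- running both loops from aligned states gives the same answer ----
lemma pvMain (arr : List Int) (n : Int) :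
    ∀ (t : ℕ), (t : Int) ≤ n →
    ∀ dp st, pvInv arr n ((t : Int) - 1) dp st →
    PySem.List.pyGetD ((PySem.List.pyRange ((t : Int) - 1) (-1) (-1)).foldl (goodSplitLoop arr n) dp) 0 0
      = (((PySem.List.pyRange ((t : Int) - 1) (-1) (-1)).foldl (goodSplitAltLoop arr) st)).1 := by
  intro t
  induction t with
  | zero =>
    intro ht dp st h
    rw [show ((0 : ℕ) : Int) - 1 = -1 by norm_num, PySem.List.pyRange_neg_one_eq_nil (by norm_num)]
    simp only [List.foldl_nil]
    have h2 := h.2.1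
    rw [h2]
    norm_num
  | succ t ih =>
    intro ht dp st h
    have hc : ((t + 1 : ℕ) : Int) - 1 = (t : Int) := by push_cast; ring
    rw [hc] at h ⊢
    rw [PySem.List.pyRange_neg_one_cons (by omega)]
    simp only [List.foldl_cons]
    have hstep := pvStep arr n (t : Int) (by omega) (by push_cast at ht; omega) dp st h
    exact ih (by push_cast at ht ⊢; omega) _ _ hstep

lemma pvInit (arr : List Int) (n : Int) (hn : 0 ≤ n) :
    pvInv arr n (n - 1) (List.replicate (n + 1).toNat 0)
      (0, PySem.Dict.empty, none, none) := by
  have hr : PySem.List.pyRange (n - 1 + 1) n 1 = [] := by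
    rw [show n - 1 + 1 = n by ring]
    exact PySem.List.pyRange_one_eq_nil (le_refl n)
  refine ⟨by simp, ?_, ?_, ?_, ?_⟩
  · show (0 : Int) = PySem.List.pyGetD (List.replicate (n + 1).toNat 0) ((n - 1) + 1) 0
    rw [show n - 1 + 1 = n by ring,
      PySem.List.pyGetD_eq_getElem _ 0 hn (by rw [List.length_replicate]; omega)]
    simp
  · intro k hk
    simp only [pvLk, hr, List.filter_nil, List.map_nil, pvMinO, PySem.Dict.get?_empty]
  · simp only [pvLz, hr, List.filter_nil, List.map_nil, pvMinO]
  · simp only [pvLb, hr, List.filter_nil, List.map_nil, pvMinO]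

-- ===== VERDICT (by name: the statement is the Claim_ definition above) =====
theorem goodSplit_spec : Claim_equal_goodSplit := by
  intro arr n _ hpre
  obtain ⟨hn, -⟩ := hpre
  unfold Spec_goodSplit goodSplit goodSplit_alt
  have h := pvMain arr n n.toNat (by omega) (List.replicate (n + 1).toNat 0)
    (0, PySem.Dict.empty, none, none)
    (by have := pvInit arr n hn; rwa [Int.toNat_of_nonneg hn])
  rw [Int.toNat_of_nonneg hn] at h
  exact h
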